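-- pv_equiv track=rewrite | github.com/yuukiqt/parallel-gdm | optimizer.py | zero_after_first_zero
-- ===== SOURCE A (Python) =====
-- def zero_after_first_zero(lst):
--     zero_found = False
--     for i in range(len(lst)):
--         if zero_found:
--             lst[i] = 0
--         elif lst[i] == 0:
--             zero_found = True
--     return lst
-- ===== SOURCE B (Python) =====
-- def zero_after_first_zero(lst):
--     # Locate the first zero, then bulk-overwrite the tail in place.
--     try:
--         idx = lst.index(0)
--     except ValueError:
--         return lst
--     lst[idx + 1:] = [0] * (len(lst) - idx - 1)
--     return lst
-- ===== Notes on version B (the rewrite author's own statement) =====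
-- stated objective: simpler
-- what changed: Replaces the flag-driven element-by-element pass with locate-first-zero (list.index) followed by one bulk slice overwrite of the tail; same in-place mutation and return.
import Mathlib
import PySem

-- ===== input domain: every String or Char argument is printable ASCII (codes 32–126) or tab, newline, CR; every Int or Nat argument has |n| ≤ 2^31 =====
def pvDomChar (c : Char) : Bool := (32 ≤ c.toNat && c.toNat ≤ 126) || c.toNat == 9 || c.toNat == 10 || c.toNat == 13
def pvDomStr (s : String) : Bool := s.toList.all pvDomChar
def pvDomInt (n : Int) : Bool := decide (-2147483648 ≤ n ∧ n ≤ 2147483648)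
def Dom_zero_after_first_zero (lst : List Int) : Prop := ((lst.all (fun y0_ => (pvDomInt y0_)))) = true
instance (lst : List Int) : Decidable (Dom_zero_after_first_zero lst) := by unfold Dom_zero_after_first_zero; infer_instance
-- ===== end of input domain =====

-- B replaces A's flag-driven per-element pass by locate-first-zero + one bulk tail overwrite (simpler decomposition).
-- Both Pythons mutate lst in place identically and return it; the theorem is about the returned value.
-- ===== PORT A =====
-- loop over the list carrying the zero_found flag, rewriting elements once it is set
def zafzLoopA (zero_found : Bool) : List Int → List Int
  | [] => []
  | x :: xs =>
    if zero_found then 0 :: zafzLoopA true xs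
    else if x == 0 then x :: zafzLoopA true xs
    else x :: zafzLoopA false xs

def zero_after_first_zero (lst : List Int) : List Int := zafzLoopA false lst

-- ===== PORT B =====
def zero_after_first_zero_alt (lst : List Int) : List Int :=
  match PySem.List.index? lst 0 with
  | none => lst
  | some idx => lst.take (idx + 1) ++ List.replicate (lst.length - (idx + 1)) 0

-- ===== PRECONDITION & SPEC =====
def Spec_zero_after_first_zero (lst : List Int) (out : List Int) : Prop := out = zero_after_first_zero_alt lst
instance (lst : List Int) (out : List Int) : Decidable (Spec_zero_after_first_zero lst out) := by unfold Spec_zero_after_first_zero; infer_instance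

-- ===== CLAIM (what is proved, stated in full; the proofs are below) =====
def Claim_equal_zero_after_first_zero : Prop := ∀ (lst : List Int), Dom_zero_after_first_zero lst → Spec_zero_after_first_zero lst (zero_after_first_zero lst)

-- ===== LEMMAS AND PROOFS =====

-- ===== VERDICT (by name: the statement is the Claim_ definition above) =====
lemma zafzLoopA_true (xs : List Int) : zafzLoopA true xs = List.replicate xs.length 0 := by
  induction xs with
  | nil => rfl
  | cons x xs ih => simp [zafzLoopA, ih, List.replicate_succ]

lemma zafz_eq (lst : List Int) : zafzLoopA false lst = zero_after_first_zero_alt lst := by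
  induction lst with
  | nil => rfl
  | cons x xs ih =>
    by_cases hx : x = 0
    · subst hx
      unfold zero_after_first_zero_alt
      rw [PySem.List.index?_cons_self]
      simp [zafzLoopA, zafzLoopA_true]
    · have hidx := PySem.List.index?_cons_of_ne (x := x) (xs := xs) (v := 0) hx
      unfold zero_after_first_zero_alt
      rw [hidx]
      unfold zero_after_first_zero_alt at ih
      cases h : PySem.List.index? xs 0 with
      | none =>
        rw [h] at ih
        simp only [Option.map_none]
        simp [zafzLoopA, hx, ih]
      | some k =>
        rw [h] at ih
        simp only [Option.map_some]
        simp [zafzLoopA, hx, ih, List.take_succ_cons, Nat.succ_sub_succ]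

theorem zero_after_first_zero_spec : Claim_equal_zero_after_first_zero := by
  intro lst _
  unfold Spec_zero_after_first_zero zero_after_first_zero
  exact zafz_eq lst
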